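-- pv_equiv track=rewrite | github.com/pypi-data/pypi-mirror-364 | packages/substitutionciphers/substitutionciphers-1.0.0.tar.gz/substitutionciphers-1.0.0/src/substitutionciphers/griffinere.py | _cycle_take
-- ===== SOURCE A (Python) =====
-- from typing import Dict, List
--
-- def _cycle_take(source: str, count: int, front: bool) -> str:
--     if count <= 0 or not source:
--         return ""
--     result: List[str] = []
--     length = len(source)
--     idx = 0
--     while len(result) < count:
--         result.append(source[idx % length] if front else source[-1 - (idx % length)])
--         idx += 1
--     return "".join(result)
-- ===== SOURCE B (Python) =====
-- def _cycle_take(source: str, count: int, front: bool) -> str: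
--     if count <= 0 or not source:
--         return ""
--     base = source if front else source[::-1]
--     return (base * (count // len(base) + 1))[:count]
-- ===== Notes on version B (the rewrite author's own statement) =====
-- stated objective: faster
-- what changed: Replaces the per-character while loop (index modulo arithmetic, conditional negative indexing, list append + join) by reversing the source once when front is false and then building the result with one string repetition and a single slice.
import Mathlib
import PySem

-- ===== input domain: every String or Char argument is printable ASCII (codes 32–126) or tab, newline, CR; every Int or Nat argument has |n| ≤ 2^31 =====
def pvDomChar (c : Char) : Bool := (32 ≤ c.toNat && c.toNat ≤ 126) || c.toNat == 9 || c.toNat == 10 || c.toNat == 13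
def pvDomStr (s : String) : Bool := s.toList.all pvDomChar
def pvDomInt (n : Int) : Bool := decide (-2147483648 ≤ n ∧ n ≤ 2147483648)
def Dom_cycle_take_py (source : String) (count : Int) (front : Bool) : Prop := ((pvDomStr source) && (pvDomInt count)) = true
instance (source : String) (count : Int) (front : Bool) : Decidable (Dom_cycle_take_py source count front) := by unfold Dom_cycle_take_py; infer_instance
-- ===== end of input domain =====

-- B builds the output by reversing the source once (when front is false) and then one repetition + slice,
-- instead of A's per-character loop with modulo / negative indexing.

-- ===== PORT A =====
-- while len(result) < count: result.append(source[idx % length] if front else source[-1 - (idx % length)]); idx += 1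
-- (both indices are always in range, so pyGetD is exact here)
def cycleTakeLoop (src : List Char) (length : Nat) (front : Bool) (count : Int)
    (idx : Nat) (result : List Char) : List Char :=
  if (result.length : Int) < count then
    cycleTakeLoop src length front count (idx + 1)
      (result ++ [if front then PySem.List.pyGetD src ((idx % length : Nat) : Int) ' '
                  else PySem.List.pyGetD src (-1 - ((idx % length : Nat) : Int)) ' '])
  else result
termination_by (count - result.length).toNat
decreasing_by simp; omega

def cycle_take_py (source : String) (count : Int) (front : Bool) : String :=
  if count ≤ 0 ∨ source.toList = [] then ""
  else String.mk (cycleTakeLoop source.toList source.toList.length front count 0 [])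

-- ===== PORT B =====
-- base = source if front else source[::-1]  (s[::-1] is reverse: PySem.List.slice?_none_none_neg_one)
-- return (base * (count // len(base) + 1))[:count]   (string repetition ported as flatten ∘ replicate, exact for the nonnegative factor used here)
def cycle_take_py_alt (source : String) (count : Int) (front : Bool) : String :=
  if count ≤ 0 ∨ source.toList = [] then ""
  else
    let base := if front then source.toList else source.toList.reverse
    let reps := (PySem.Int.floordiv count base.length + 1).toNat
    String.mk (PySem.List.slice (List.replicate reps base).flatten none (some count))

-- ===== PRECONDITION & SPEC =====
def Spec_cycle_take_py (source : String) (count : Int) (front : Bool) (out : String) : Prop := out = cycle_take_py_alt source count front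
instance (source : String) (count : Int) (front : Bool) (out : String) : Decidable (Spec_cycle_take_py source count front out) := by unfold Spec_cycle_take_py; infer_instance

-- ===== CLAIM (what is proved, stated in full; the proofs are below) =====
def Claim_equal_cycle_take_py : Prop := ∀ (source : String) (count : Int) (front : Bool), Dom_cycle_take_py source count front → Spec_cycle_take_py source count front (cycle_take_py source count front)

-- ===== LEMMAS AND PROOFS =====

-- the character A appends at loop index i
def pick (src : List Char) (length : Nat) (front : Bool) (i : Nat) : Char :=
  if front then PySem.List.pyGetD src ((i % length : Nat) : Int) ' '
  else PySem.List.pyGetD src (-1 - ((i % length : Nat) : Int)) ' '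

theorem cycleTakeLoop_eq (src : List Char) (L : Nat) (front : Bool) (count : Int) :
    ∀ (k : Nat) (idx : Nat) (result : List Char),
      (count - result.length).toNat = k →
      cycleTakeLoop src L front count idx result
        = result ++ (List.range k).map (fun j => pick src L front (idx + j)) := by
  intro k
  induction k with
  | zero =>
      intro idx result hk
      rw [cycleTakeLoop]
      rw [if_neg (by omega)]
      simp
  | succ k ih =>
      intro idx result hk
      rw [cycleTakeLoop]
      rw [if_pos (by omega)]
      rw [ih (idx + 1) _ (by simp; omega)]
      have hr : (List.range (k + 1)).map (fun j => pick src L front (idx + j))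
          = pick src L front idx
              :: (List.range k).map (fun j => pick src L front (idx + 1 + j)) := by
        rw [List.range_succ_eq_map]
        simp only [List.map_cons, List.map_map, Nat.add_zero]
        congr 1
        apply List.map_congr_left
        intro j _
        simp only [Function.comp_apply]
        congr 1
        omega
      rw [hr]
      simp [pick]

theorem flatten_replicate_getElem? (base : List Char) (hb : base ≠ []) :
    ∀ (k i : Nat), i < k * base.length →
      (List.replicate k base).flatten[i]? = base[i % base.length]? := by
  intro k
  induction k with
  | zero => intro i h; rw [Nat.zero_mul] at h; omega
  | succ k ih =>
      intro i h
      have hkl : (k + 1) * base.length = k * base.length + base.length := by ring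
      rw [List.replicate_succ, List.flatten_cons]
      by_cases hi : i < base.length
      · rw [List.getElem?_append_left hi, Nat.mod_eq_of_lt hi]
      · obtain ⟨j, rfl⟩ : ∃ j, i = base.length + j := ⟨i - base.length, by omega⟩
        rw [List.getElem?_append_right (by omega)]
        have hj : base.length + j - base.length = j := by omega
        rw [hj, Nat.add_mod_left]
        exact ih j (by omega)

theorem take_flatten_replicate (base : List Char) (hb : base ≠ []) (n k : Nat)
    (hn : n ≤ k * base.length) :
    (List.replicate k base).flatten.take n
      = (List.range n).map (fun i => base.getD (i % base.length) ' ') := by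
  apply List.ext_getElem?
  intro i
  rw [List.getElem?_take]
  by_cases hi : i < n
  · rw [if_pos hi, flatten_replicate_getElem? base hb k i (by omega)]
    rw [List.getElem?_map, List.getElem?_range hi]
    have hm : i % base.length < base.length :=
      Nat.mod_lt _ (List.length_pos_iff.mpr hb)
    rw [List.getElem?_eq_getElem hm]
    simp only [Option.map_some]
    rw [List.getD_eq_getElem _ _ hm]
  · rw [if_neg hi]
    symm
    exact List.getElem?_eq_none (by simp; omega)

theorem pick_true (src : List Char) (i : Nat) :
    pick src src.length true i = src.getD (i % src.length) ' ' := by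
  unfold pick
  rw [if_pos rfl]
  exact PySem.List.pyGetD_natCast src _ ' '

theorem pick_false (src : List Char) (hs : src ≠ []) (i : Nat) :
    pick src src.length false i = src.reverse.getD (i % src.length) ' ' := by
  have hL : 0 < src.length := List.length_pos_iff.mpr hs
  have hm : i % src.length < src.length := Nat.mod_lt _ hL
  unfold pick
  rw [if_neg (by simp)]
  have h1 : (-1 - ((i % src.length : Nat) : Int)) = -(((i % src.length + 1 : Nat) : Int)) := by
    push_cast; ring
  rw [h1, PySem.List.pyGetD_neg_natCast src _ ' ' (by omega) (by omega)]
  rw [List.getD_eq_getElem _ _ (by simpa using hm), List.getElem_reverse]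
  simp only [show src.length - (i % src.length + 1) = src.length - 1 - i % src.length
    from by omega]

theorem loop_eq_rep (src base : List Char) (front : Bool) (count : Int)
    (hs : src ≠ []) (hbL : base.length = src.length)
    (hp : ∀ i, pick src src.length front i = base.getD (i % src.length) ' ')
    (hc : 0 < count) :
    cycleTakeLoop src src.length front count 0 []
      = PySem.List.slice
          (List.replicate ((PySem.Int.floordiv count base.length + 1).toNat) base).flatten
          none (some count) := by
  have hL : 0 < src.length := List.length_pos_iff.mpr hs
  have hbne : base ≠ [] := by
    intro h; rw [h] at hbL; simp at hbL; omega
  have hb : (0 : Int) < (base.length : Int) := by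
    have := List.length_pos_iff.mpr hbne; exact_mod_cast this
  have hfd0 : 0 ≤ PySem.Int.floordiv count base.length :=
    (PySem.Int.le_floordiv_iff_mul_le hb).mpr (by simp; omega)
  have h2 : count < (PySem.Int.floordiv count base.length + 1) * (base.length : Int) :=
    (PySem.Int.floordiv_lt_iff_lt_mul hb).mp (by omega)
  have h4 : (PySem.Int.floordiv count base.length + 1) * (base.length : Int)
      = (((PySem.Int.floordiv count base.length + 1).toNat * base.length : Nat) : Int) := by
    push_cast [Int.toNat_of_nonneg (show 0 ≤ PySem.Int.floordiv count base.length + 1 by omega)]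
    ring
  rw [h4] at h2
  have key : count.toNat ≤ (PySem.Int.floordiv count base.length + 1).toNat * base.length := by
    omega
  rw [PySem.List.slice_to _ (le_of_lt hc)]
  rw [take_flatten_replicate base hbne count.toNat _ key]
  rw [cycleTakeLoop_eq src src.length front count count.toNat 0 [] (by simp)]
  simp only [List.nil_append, Nat.zero_add]
  apply List.map_congr_left
  intro i _
  rw [hbL]
  exact hp i

-- ===== VERDICT (by name: the statement is the Claim_ definition above) =====
theorem cycle_take_py_spec : Claim_equal_cycle_take_py := by
  unfold Claim_equal_cycle_take_py
  intro source count front _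
  unfold Spec_cycle_take_py
  simp only [cycle_take_py, cycle_take_py_alt]
  by_cases hg : count ≤ 0 ∨ source.toList = []
  · rw [if_pos hg, if_pos hg]
  · rw [if_neg hg, if_neg hg]
    push_neg at hg
    obtain ⟨hc, hs⟩ := hg
    apply congrArg String.mk
    apply loop_eq_rep source.toList _ front count hs _ _ (by omega)
    · cases front <;> simp
    · intro i
      cases front
      · rw [if_neg (by simp)]
        exact pick_false source.toList hs i
      · rw [if_pos rfl]
        exact pick_true source.toList i
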